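-- pv_equiv track=rewrite | github.com/Usama129/median-string-search | medianString.py | total_distance
-- ===== SOURCE A (Python) =====
-- from operator import ne
--
-- def total_distance(pattern, DNA):
--     # aligns pattern over each DNA chain n - l + 1 times to find the minimum possible distance for each chain
--     # adds up the result for each chain and returns the sum
--     l = len(pattern)
--     distance = 0
--     for i in range (len(DNA)):
--         chain = DNA[i]
--         bestDistance = 100000
--         for j in range (len(chain) - l + 1):
--             kmer = chain[j:j+l]
--             kmerDistance = hammingDistance(pattern, kmer)
--             if kmerDistance < bestDistance:
--                 bestDistance = kmerDistance
--         distance += bestDistance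
--
--     return distance
--
-- def hammingDistance(x, y):
--     if len(x) != len(y):
--         raise ValueError('Length not equal')
--     return sum(map(ne, x, y)) # number of mismatches
-- ===== SOURCE B (Python) =====
-- def total_distance(pattern, DNA):
--     # Column-wise sweep: for each chain keep one mismatch counter per alignment and
--     # update all of them per pattern position, then take a single min per chain
--     # (100000 is the original's sentinel: the value for a too-short chain and a cap).
--     l = len(pattern)
--     total = 0
--     for chain in DNA:
--         m = len(chain) - l + 1
--         if m <= 0:
--             total += 100000
--             continue
--         mism = [0] * m
--         for k, ch in enumerate(pattern):
--             seg = chain[k:k + m]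
--             mism = [d + (a != ch) for d, a in zip(mism, seg)]
--         total += min(100000, min(mism))
--     return total
-- ===== Notes on version B (the rewrite author's own statement) =====
-- stated objective: alternative
-- what changed: Instead of rescanning a freshly sliced k-mer per alignment (row-major min of Hamming distances), B keeps one mismatch counter per alignment and sweeps the pattern column-wise, updating all counters in one comprehension per pattern position, then takes a single min per chain.
import Mathlib
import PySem

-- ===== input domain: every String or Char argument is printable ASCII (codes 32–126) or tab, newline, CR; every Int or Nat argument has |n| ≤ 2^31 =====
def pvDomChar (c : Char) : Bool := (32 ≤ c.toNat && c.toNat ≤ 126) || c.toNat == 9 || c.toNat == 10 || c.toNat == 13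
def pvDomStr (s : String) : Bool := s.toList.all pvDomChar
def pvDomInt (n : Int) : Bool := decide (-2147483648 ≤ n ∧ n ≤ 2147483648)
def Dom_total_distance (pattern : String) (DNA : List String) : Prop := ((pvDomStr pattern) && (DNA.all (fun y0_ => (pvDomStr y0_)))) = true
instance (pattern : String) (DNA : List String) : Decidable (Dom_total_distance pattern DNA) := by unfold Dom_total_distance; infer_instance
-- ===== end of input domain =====

-- B is an alternative, column-wise accumulation of the same per-chain minimum mismatch
-- count; same asymptotic cost, proved to return A's exact value on every input.

-- ===== PORT A =====
-- raise ValueError → none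
def hammingDistance? (x y : List Char) : Option Int :=
  if x.length = y.length then
    some (((List.zipWith (fun a b => decide (a ≠ b)) x y).count true : Nat) : Int)
  else none

-- the body of A's outer loop for one chain (best distance over all alignments)
def chainBestA (p c : List Char) : Int :=
  (PySem.List.pyRange 0 ((c.length : Int) - (p.length : Int) + 1) 1).foldl
    (fun bestDistance j =>
      let kmer := PySem.List.slice c (some j) (some (j + (p.length : Int)))
      match hammingDistance? p kmer with
      | some kmerDistance => if kmerDistance < bestDistance then kmerDistance else bestDistance
      | none => bestDistance)   -- unreachable: the slice always has length len(pattern) here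
    100000

def total_distance (pattern : String) (DNA : List String) : Int :=
  DNA.foldl (fun distance chain => distance + chainBestA pattern.toList chain.toList) 0

-- ===== PORT B =====
-- B's inner update: mism = [d + (a != ch) for d, a in zip(mism, chain[k:k+m])]
def colStep (c : List Char) (m : Int) (mism : List Int) (kc : Int × Char) : List Int :=
  let seg := PySem.List.slice c (some kc.1) (some (kc.1 + m))
  (mism.zip seg).map (fun da => da.1 + (if da.2 ≠ kc.2 then 1 else 0))

-- B's per-chain value: column-wise mismatch counters, then one min
def chainBestB (p c : List Char) : Int :=
  let m : Int := (c.length : Int) - (p.length : Int) + 1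
  if m ≤ 0 then 100000
  else
    let mism := (PySem.List.enumerate p).foldl (colStep c m) (List.replicate m.toNat 0)
    match PySem.List.min? mism (fun x => x) with
    | some v => min 100000 v
    | none => 100000   -- unreachable: mism is nonempty since m > 0

def total_distance_alt (pattern : String) (DNA : List String) : Int :=
  DNA.foldl (fun total chain => total + chainBestB pattern.toList chain.toList) 0

-- ===== PRECONDITION & SPEC =====
def Spec_total_distance (pattern : String) (DNA : List String) (out : Int) : Prop := out = total_distance_alt pattern DNA
instance (pattern : String) (DNA : List String) (out : Int) : Decidable (Spec_total_distance pattern DNA out) := by unfold Spec_total_distance; infer_instance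

-- ===== CLAIM (what is proved, stated in full; the proofs are below) =====
def Claim_equal_total_distance : Prop := ∀ (pattern : String) (DNA : List String), Dom_total_distance pattern DNA → Spec_total_distance pattern DNA (total_distance pattern DNA)

-- ===== LEMMAS AND PROOFS =====

-- number of mismatching positions (common characterisation of both programs)
def Dmis (x y : List Char) : Int := ((List.zipWith (fun a b => decide (a ≠ b)) x y).count true : Nat)

theorem Dmis_cons (a b : Char) (x y : List Char) :
    Dmis (a :: x) (b :: y) = (if b ≠ a then 1 else 0) + Dmis x y := by
  by_cases h : a = b
  · simp [Dmis, h]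
  · simp [Dmis, h, ne_comm]
    omega

theorem zipWith_take_right (f : Char → Char → Bool) (x : List Char) (ys : List Char) (n : Nat)
    (h : x.length ≤ n) : List.zipWith f x (ys.take n) = List.zipWith f x ys := by
  induction x generalizing ys n with
  | nil => simp
  | cons a x ih =>
    cases ys with
    | nil => simp
    | cons b ys =>
      cases n with
      | zero => simp at h
      | succ n => simp only [List.take_succ_cons, List.zipWith_cons_cons, ih ys n (by simpa using h)]

theorem hd_slice (p c : List Char) (jn : Nat) (h : jn + p.length ≤ c.length) :
    hammingDistance? p (PySem.List.slice c (some (jn:Int)) (some ((jn:Int) + (p.length:Int))))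
      = some (Dmis p (c.drop jn)) := by
  rw [PySem.List.slice_natCast_add]
  have hlen : ((c.drop jn).take p.length).length = p.length := by
    simp; omega
  rw [hammingDistance?, if_pos hlen.symm,
    zipWith_take_right _ _ _ _ (le_refl _)]
  rfl

-- colStep in closed form
theorem colStep_eq (c : List Char) (ch : Char) (k mN : Nat) (ms : List Int)
    (hms : ms.length = mN) (hk : k + mN ≤ c.length) :
    colStep c (mN : Int) ms ((k : Int), ch)
      = (List.range mN).map
          (fun j => ms.getD j 0 + (if c.getD (j + k) ch ≠ ch then 1 else 0)) := by
  have hseg : PySem.List.slice c (some ((k:Nat):Int)) (some (((k:Nat):Int) + (mN:Int)))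
      = (c.drop k).take mN := PySem.List.slice_natCast_add c k mN
  simp only [colStep, hseg]
  apply List.ext_getElem
  · simp only [List.length_map, List.length_zip, List.length_take, List.length_drop,
      List.length_range, hms]
    omega
  · intro j h1 h2
    simp only [List.getElem_map, List.getElem_zip, List.getElem_range, List.getElem_take,
      List.getElem_drop]
    have hj : j < mN := by simp at h2; omega
    rw [List.getD_eq_getElem ms 0 (by omega), List.getD_eq_getElem c ch (by omega)]
    have hji : j + k = k + j := Nat.add_comm j k
    simp [hji]

theorem foldB (c : List Char) (mN : Nat) (q : List Char) (k : Nat) (ms : List Int)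
    (hms : ms.length = mN) (hb : k + q.length + mN ≤ c.length + 1) :
    (PySem.List.enumerate q (k : Int)).foldl (colStep c (mN : Int)) ms
      = (List.range mN).map (fun j => ms.getD j 0 + Dmis q (c.drop (j + k))) := by
  induction q generalizing k ms with
  | nil =>
    apply List.ext_getElem
    · simp [PySem.List.enumerate, hms]  -- enumerate [] = []
    · intro j h1 h2
      simp only [PySem.List.enumerate_nil, List.foldl_nil] at *
      simp only [List.getElem_map, List.getElem_range]
      rw [List.getD_eq_getElem ms 0 (by simp at h2; omega)]
      simp [Dmis]
  | cons ch q ih =>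
    rw [PySem.List.enumerate_cons, List.foldl_cons]
    rw [colStep_eq c ch k mN ms hms (by simp at hb; omega)]
    have : ((k : Int) + 1) = ((k + 1 : Nat) : Int) := by omega
    rw [this, ih (k + 1) _ (by simp) (by simp at hb ⊢; omega)]
    apply List.map_congr_left
    intro j hj
    have hjm : j < mN := List.mem_range.mp hj
    have hjk : j + k < c.length := by simp at hb; omega
    rw [List.getD_eq_getElem _ 0 (by simp [hjm]),
      List.getElem_map, List.getElem_range]
    rw [List.drop_eq_getElem_cons hjk, Dmis_cons]
    rw [List.getD_eq_getElem c ch (by omega)]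
    have : j + (k + 1) = j + k + 1 := by omega
    rw [this]
    ring

theorem min_foldl_assoc (t : List Int) (a x : Int) :
    min a (t.foldl min x) = t.foldl min (min a x) := by
  induction t generalizing x with
  | nil => simp
  | cons y t ih =>
    simp only [List.foldl_cons]
    rw [ih, min_assoc]

theorem min100_fold (L : List Int) (hL : L ≠ []) :
    (match PySem.List.min? L (fun x => x) with | some v => min 100000 v | none => 100000)
      = L.foldl min 100000 := by
  cases L with
  | nil => exact absurd rfl hL
  | cons x t =>
    rw [PySem.List.min?_id_cons]
    simp only [List.foldl_cons]
    rw [min_foldl_assoc]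

theorem chainBest_eq (p c : List Char) : chainBestA p c = chainBestB p c := by
  by_cases h : (c.length : Int) - (p.length : Int) + 1 ≤ 0
  · unfold chainBestA chainBestB
    rw [PySem.List.pyRange_one_eq_nil h, if_pos h]
    rfl
  · have hln : p.length ≤ c.length := by omega
    set l := p.length with hl
    set n := c.length with hn
    set mN : Nat := n - l + 1 with hmN
    have hm : (n : Int) - (l : Int) + 1 = (mN : Int) := by omega
    have hmpos : 0 < mN := by omega
    -- B side
    have hB : chainBestB p c
        = ((List.range mN).map (fun j => Dmis p (c.drop j))).foldl min 100000 := by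
      unfold chainBestB
      rw [if_neg (by rw [← hl, ← hn, hm]; exact_mod_cast h)]
      rw [← hl, ← hn, hm]
      simp only [Int.toNat_natCast]
      have hf := foldB c mN p 0 (List.replicate mN 0) (by simp) (by omega)
      simp only [Nat.cast_zero] at hf
      rw [hf]
      have hmap : (List.range mN).map (fun j => (List.replicate mN (0:Int)).getD j 0 + Dmis p (c.drop (j + 0)))
          = (List.range mN).map (fun j => Dmis p (c.drop j)) := by
        apply List.map_congr_left
        intro j hj
        have : j < mN := List.mem_range.mp hj
        rw [List.getD_eq_getElem _ 0 (by simpa), List.getElem_replicate]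
        simp
      rw [hmap, min100_fold _ (by simp only [ne_eq, List.map_eq_nil_iff, List.range_eq_nil]; omega)]
    -- A side
    rw [hB]
    unfold chainBestA
    rw [← hl, ← hn, hm, PySem.List.pyRange_zero_nat, List.foldl_map, List.foldl_map]
    apply PySem.List.foldl_congr_mem
    intro acc x hx
    have hx' : x < mN := List.mem_range.mp hx
    simp only
    rw [hd_slice p c x (by omega)]
    rw [show (match some (Dmis p (c.drop x)) with
        | some kmerDistance => if kmerDistance < acc then kmerDistance else acc
        | none => acc)
      = if Dmis p (c.drop x) < acc then Dmis p (c.drop x) else acc from rfl]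
    by_cases hlt : Dmis p (c.drop x) < acc
    · rw [if_pos hlt, min_eq_right (le_of_lt hlt)]
    · rw [if_neg hlt, min_eq_left (by omega)]

-- ===== VERDICT (by name: the statement is the Claim_ definition above) =====
theorem total_distance_spec : Claim_equal_total_distance := by
  intro pattern DNA _
  unfold Spec_total_distance total_distance total_distance_alt
  simp only [chainBest_eq]
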